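-- pv_equiv track=rewrite | github.com/iambiggsharaf/robiya | task2.py | find_population
-- ===== SOURCE A (Python) =====
-- def find_population(cities, city_name):
--     low = 0
--     high = len(cities) - 1
--     mid = 0
--
--     while low <= high:
--
--         mid = (high + low) // 2
--
--         # If city name is greater, ignore left half
--         if cities[mid][0] < city_name:
--             low = mid + 1
--
--         # If city name is smaller, ignore right half
--         elif cities[mid][0] > city_name:
--             high = mid - 1
--
--         # means x is present at mid
--         else:
--             return cities[mid][1]
--
--     # If we reach here, then the element was not present
--     return -1
-- ===== SOURCE B (Python) =====
-- def find_population(cities, city_name):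
--     # Recursive half-interval search over (base, length) segments instead of
--     # an iterative low/high loop; same mid element and branch order as A.
--     def go(base, n):
--         if n == 0:
--             return -1
--         half = (n - 1) // 2
--         name, pop = cities[base + half]
--         if name < city_name:
--             return go(base + half + 1, n - half - 1)
--         if name > city_name:
--             return go(base, half)
--         return pop
--     return go(0, len(cities))
-- ===== Notes on version B (the rewrite author's own statement) =====
-- stated objective: alternative
-- what changed: Replaces the iterative low/high while-loop over signed indices with a recursive half-interval search threading a (base, length) segment of natural numbers; probes the identical mid element in the same branch order.
import Mathlib
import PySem

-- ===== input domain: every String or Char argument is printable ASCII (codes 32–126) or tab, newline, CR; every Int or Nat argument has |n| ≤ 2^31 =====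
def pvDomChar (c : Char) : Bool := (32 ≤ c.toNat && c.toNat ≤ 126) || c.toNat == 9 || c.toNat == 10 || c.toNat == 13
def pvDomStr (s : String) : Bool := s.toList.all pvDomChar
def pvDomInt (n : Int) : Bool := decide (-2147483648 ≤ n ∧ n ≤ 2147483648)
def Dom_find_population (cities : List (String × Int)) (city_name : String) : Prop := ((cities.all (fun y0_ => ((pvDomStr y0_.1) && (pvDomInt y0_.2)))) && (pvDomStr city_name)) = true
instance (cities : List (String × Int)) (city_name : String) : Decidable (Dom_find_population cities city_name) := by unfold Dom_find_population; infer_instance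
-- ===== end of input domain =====

-- ===== PORT A =====
-- Literal port of A's while-loop: state (low, high) as Ints, mid = (high+low)//2
-- (written inline at its use sites), cities[mid] via pyGet? (the none branch is
-- Python's IndexError, unreachable from the initial call since mid always lies in
-- [low, high] ⊆ [0, len-1]).
def findLoopA (cities : List (String × Int)) (city_name : String) (low high : Int) : Int :=
  if h : low ≤ high then
    match PySem.List.pyGet? cities (PySem.Int.floordiv (high + low) 2) with
    | none => -1
    | some c =>
      if c.1 < city_name then findLoopA cities city_name (PySem.Int.floordiv (high + low) 2 + 1) high
      else if city_name < c.1 then findLoopA cities city_name low (PySem.Int.floordiv (high + low) 2 - 1)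
      else c.2
  else -1
termination_by (high + 1 - low).toNat
decreasing_by
  · have := PySem.Int.le_floordiv_iff_mul_le (a := high + low) (b := 2) (q := low)
    omega
  · have := PySem.Int.floordiv_lt_iff_lt_mul (a := high + low) (b := 2) (q := high + 1)
    omega

def find_population (cities : List (String × Int)) (city_name : String) : Int :=
  findLoopA cities city_name 0 ((cities.length : Int) - 1)

-- ===== PORT B =====
-- Port of B: recursive half-interval search over a (base, length) segment of Nats;
-- half = (n-1)/2 written inline at its use sites.
def bsearchB (cities : List (String × Int)) (city_name : String) (base n : Nat) : Int :=
  if n = 0 then -1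
  else
    if (cities.getD (base + (n - 1) / 2) ("", 0)).1 < city_name then
      bsearchB cities city_name (base + (n - 1) / 2 + 1) (n - (n - 1) / 2 - 1)
    else if city_name < (cities.getD (base + (n - 1) / 2) ("", 0)).1 then
      bsearchB cities city_name base ((n - 1) / 2)
    else (cities.getD (base + (n - 1) / 2) ("", 0)).2
termination_by n
decreasing_by all_goals omega

def find_population_alt (cities : List (String × Int)) (city_name : String) : Int :=
  bsearchB cities city_name 0 cities.length

-- ===== PRECONDITION & SPEC =====
def Spec_find_population (cities : List (String × Int)) (city_name : String) (out : Int) : Prop := out = find_population_alt cities city_name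
instance (cities : List (String × Int)) (city_name : String) (out : Int) : Decidable (Spec_find_population cities city_name out) := by unfold Spec_find_population; infer_instance

-- ===== CLAIM (what is proved, stated in full; the proofs are below) =====
def Claim_equal_find_population : Prop := ∀ (cities : List (String × Int)) (city_name : String), Dom_find_population cities city_name → Spec_find_population cities city_name (find_population cities city_name)

-- ===== LEMMAS AND PROOFS =====

-- The loop of A on the segment [base, base+n-1] computes B's search of (base, n).
theorem findLoopA_eq_bsearchB (cities : List (String × Int)) (city_name : String) :
    ∀ n base : Nat, base + n ≤ cities.length →
      findLoopA cities city_name (base : Int) ((base : Int) + (n : Int) - 1)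
        = bsearchB cities city_name base n := by
  intro n
  induction n using Nat.strong_induction_on with
  | _ n ih =>
    intro base hlen
    rw [findLoopA, bsearchB]
    by_cases hn : n = 0
    · subst hn
      rw [dif_neg (by omega), if_pos rfl]
    · rw [dif_pos (by omega), if_neg hn]
      have hmid : PySem.Int.floordiv (((base : Int) + (n : Int) - 1) + (base : Int)) 2
          = ((base + (n - 1) / 2 : Nat) : Int) := by
        rw [PySem.Int.floordiv_eq_iff_of_pos (by omega)]
        omega
      have hidx : base + (n - 1) / 2 < cities.length := by omega
      rw [hmid, PySem.List.pyGet?_natCast, List.getElem?_eq_getElem hidx,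
        List.getD_eq_getElem _ _ hidx]
      dsimp only
      by_cases h1 : cities[base + (n - 1) / 2].1 < city_name
      · rw [if_pos h1, if_pos h1]
        have e1 : ((base + (n - 1) / 2 : Nat) : Int) + 1
            = ((base + (n - 1) / 2 + 1 : Nat) : Int) := by push_cast; ring
        have e2 : ((base : Int) + (n : Int) - 1)
            = ((base + (n - 1) / 2 + 1 : Nat) : Int) + ((n - (n - 1) / 2 - 1 : Nat) : Int) - 1 := by
          omega
        rw [e1, e2, ih (n - (n - 1) / 2 - 1) (by omega) (base + (n - 1) / 2 + 1) (by omega)]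
      · rw [if_neg h1, if_neg h1]
        by_cases h2 : city_name < cities[base + (n - 1) / 2].1
        · rw [if_pos h2, if_pos h2]
          have e3 : ((base + (n - 1) / 2 : Nat) : Int) - 1
              = ((base : Int) + (((n - 1) / 2 : Nat) : Int) - 1) := by push_cast; ring
          rw [e3, ih ((n - 1) / 2) (by omega) base (by omega)]
        · rw [if_neg h2, if_neg h2]

-- ===== VERDICT (by name: the statement is the Claim_ definition above) =====
theorem find_population_spec : Claim_equal_find_population := by
  intro cities city_name _
  unfold Spec_find_population find_population find_population_alt
  have := findLoopA_eq_bsearchB cities city_name cities.length 0 (by omega)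
  simpa using this
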